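-- pv_equiv track=rewrite | github.com/lumokato/pcrdb | src/pcrdb/analysis/clan.py | _exp_to_knight_level
-- ===== SOURCE A (Python) =====
-- def _exp_to_knight_level(exp: int) -> str:
--     """
--     Convert princess_knight_rank_total_exp to knight level.
--     Level 1-125: Linear, slope 53235
--     Level 126-201: Linear, slope 53236
--     Level 202-251: Quadratic, acceleration 505
--     Returns "251+" if exceeds level 251.
--     """
--     if exp is None or exp <= 0:
--         return "0"
--
--     # Cumulative exp at level boundaries
--     # Level 125: 125 * 53235 = 6654375
--     # Level 201: 6654375 + 76 * 53236 = 6654375 + 4045936 = 10700311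
--     exp_at_125 = 125 * 53235  # 6654375
--     exp_at_201 = exp_at_125 + 76 * 53236  # 10700311
--
--     if exp <= exp_at_125:
--         level = exp // 53235
--         return str(max(1, level))
--     elif exp <= exp_at_201:
--         level = 125 + (exp - exp_at_125) // 53236
--         return str(level)
--     else:
--         # Quadratic phase 202-251
--         # Each level requires: base + (level - 202) * 505
--         # Approximate by iterating
--         remaining = exp - exp_at_201
--         level = 201
--         step = 53236  # Starting step for level 202
--         while remaining > 0 and level < 251:
--             step += 505
--             if remaining >= step:
--                 remaining -= step
--                 level += 1
--             else:
--                 break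
--
--         if level >= 251:
--             return "251+"
--         return str(level)
-- ===== SOURCE B (Python) =====
-- def _exp_to_knight_level(exp):
--     if exp is None or exp <= 0:
--         return "0"
--     if exp <= 6654375:
--         return str(max(1, exp // 53235))
--     if exp <= 10700311:
--         return str(125 + (exp - 6654375) // 53236)
--     remaining = exp - 10700311
--     m = sum(1 for k in range(1, 51) if 53236 * k + 505 * k * (k + 1) // 2 <= remaining)
--     return "251+" if m >= 50 else str(201 + m)
-- ===== Notes on version B (the rewrite author's own statement) =====
-- stated objective: simpler
-- what changed: A's quadratic phase mutates remaining/step/level in a while-loop with a break; B instead counts, with a single branch-free comprehension-sum, how many of the 50 closed-form cumulative thresholds 53236*k + 505*k*(k+1)//2 fit into exp - 10700311, and the two linear phases stay as their integer-division closed forms.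
import Mathlib
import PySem

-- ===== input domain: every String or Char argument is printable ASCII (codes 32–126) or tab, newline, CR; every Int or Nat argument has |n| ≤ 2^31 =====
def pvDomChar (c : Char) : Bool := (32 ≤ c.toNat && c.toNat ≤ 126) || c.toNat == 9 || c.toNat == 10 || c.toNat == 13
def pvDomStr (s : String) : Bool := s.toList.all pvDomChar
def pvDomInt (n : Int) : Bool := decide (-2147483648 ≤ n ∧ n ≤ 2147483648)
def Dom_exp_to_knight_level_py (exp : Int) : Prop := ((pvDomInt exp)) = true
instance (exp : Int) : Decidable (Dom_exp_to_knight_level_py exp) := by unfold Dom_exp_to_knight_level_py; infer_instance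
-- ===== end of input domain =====

-- B replaces A's stateful while-loop (mutating remaining/step/level with a break) by a
-- branch-free count of the 50 closed-form cumulative level thresholds; objective: simpler.

-- ===== PORT A =====
-- A's while loop: 'while remaining > 0 and level < 251: step += 505; if remaining >= step:
-- remaining -= step; level += 1; else break'; returns the final level (step += 505 inlined).
def pvLoopA (remaining level step : Int) : Int :=
  if remaining > 0 ∧ level < 251 then
    if remaining ≥ step + 505 then pvLoopA (remaining - (step + 505)) (level + 1) (step + 505)
    else level
  else level
termination_by (251 - level).toNat
decreasing_by omega

def exp_to_knight_level_py (exp : Int) : String :=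
  if exp ≤ 0 then "0"
  else
    let exp_at_125 : Int := 125 * 53235
    let exp_at_201 : Int := exp_at_125 + 76 * 53236
    if exp ≤ exp_at_125 then
      PySem.Int.toStr (max 1 (PySem.Int.floordiv exp 53235))
    else if exp ≤ exp_at_201 then
      PySem.Int.toStr (125 + PySem.Int.floordiv (exp - exp_at_125) 53236)
    else
      let remaining := exp - exp_at_201
      let level := pvLoopA remaining 201 53236
      if level ≥ 251 then "251+" else PySem.Int.toStr level

-- ===== PORT B =====
def exp_to_knight_level_py_alt (exp : Int) : String :=
  if exp ≤ 0 then "0"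
  else if exp ≤ 6654375 then PySem.Int.toStr (max 1 (PySem.Int.floordiv exp 53235))
  else if exp ≤ 10700311 then PySem.Int.toStr (125 + PySem.Int.floordiv (exp - 6654375) 53236)
  else
    let remaining := exp - 10700311
    -- m = sum(1 for k in range(1, 51) if 53236*k + 505*k*(k+1)//2 <= remaining)
    let m : Int := (PySem.List.pyRange 1 51 1).foldl
      (fun acc k => if 53236 * k + PySem.Int.floordiv (505 * k * (k + 1)) 2 ≤ remaining then acc + 1 else acc) 0
    if m ≥ 50 then "251+" else PySem.Int.toStr (201 + m)

-- ===== PRECONDITION & SPEC =====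
def Spec_exp_to_knight_level_py (exp : Int) (out : String) : Prop := out = exp_to_knight_level_py_alt exp
instance (exp : Int) (out : String) : Decidable (Spec_exp_to_knight_level_py exp out) := by unfold Spec_exp_to_knight_level_py; infer_instance

-- ===== CLAIM (what is proved, stated in full; the proofs are below) =====
def Claim_equal_exp_to_knight_level_py : Prop := ∀ (exp : Int), Dom_exp_to_knight_level_py exp → Spec_exp_to_knight_level_py exp (exp_to_knight_level_py exp)

-- ===== LEMMAS AND PROOFS =====

-- cumulative exp needed beyond level 201 to reach level 201 + k
def Tcum : Nat → Int
  | 0 => 0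
  | k + 1 => Tcum k + (53236 + 505 * ((k : Int) + 1))

-- number of thresholds Tcum (j+1), …, Tcum 50 that are ≤ R
def pvCnt (j : Nat) (R : Int) : Int :=
  if _h : j < 50 then (if Tcum (j + 1) ≤ R then (1 : Int) else 0) + pvCnt (j + 1) R else 0
termination_by 50 - j
decreasing_by omega

theorem pvfd2 (a : Int) : PySem.Int.floordiv (2 * a) 2 = a := by
  rw [PySem.Int.floordiv_eq_ediv_of_pos (by norm_num)]
  exact Int.mul_ediv_cancel_left a (by norm_num)

theorem Tcum_closed (k : Nat) :
    Tcum k = 53236 * (k : Int) + 505 * (((k * (k + 1)) / 2 : Nat) : Int) := by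
  induction k with
  | zero => simp [Tcum]
  | succ n ih =>
    rw [Tcum, ih]
    have hexp : (n + 1) * ((n + 1) + 1) = n * (n + 1) + 2 * (n + 1) := by ring
    have h2 : ((n + 1) * ((n + 1) + 1)) / 2 = n * (n + 1) / 2 + (n + 1) := by
      rw [hexp]; omega
    rw [h2]
    push_cast
    ring

theorem Tclosed (k : Nat) :
    Tcum k = 53236 * (k : Int) + PySem.Int.floordiv (505 * (k : Int) * ((k : Int) + 1)) 2 := by
  obtain ⟨c, hc⟩ := Nat.even_mul_succ_self k
  have hc2 : k * (k + 1) = 2 * c := by omega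
  have h1 : (505 * (k : Int) * ((k : Int) + 1)) = 2 * (505 * (c : Int)) := by
    have := congrArg (Nat.cast : Nat → Int) hc2
    push_cast at this
    nlinarith [this]
  rw [h1, pvfd2, Tcum_closed]
  have h3 : (k * (k + 1)) / 2 = c := by omega
  rw [h3]

theorem pvCnt_zero : ∀ (n j : Nat), 50 - j = n → ∀ R : Int, R < Tcum (j + 1) → pvCnt j R = 0 := by
  intro n
  induction n with
  | zero =>
    intro j hj R _
    rw [pvCnt, dif_neg (by omega)]
  | succ n ih =>
    intro j hj R hR
    rw [pvCnt, dif_pos (by omega), if_neg (by omega)]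
    have hlt : Tcum (j + 1) ≤ Tcum (j + 1 + 1) := by
      conv_rhs => rw [Tcum]
      push_cast; omega
    rw [ih (j + 1) (by omega) R (by omega)]
    norm_num

theorem loop_inv : ∀ (n j : Nat), j + n = 50 → ∀ R : Int,
    pvLoopA (R - Tcum j) (201 + (j : Int)) (53236 + 505 * (j : Int)) = 201 + (j : Int) + pvCnt j R := by
  intro n
  induction n with
  | zero =>
    intro j hj R
    have : j = 50 := by omega
    subst this
    rw [pvLoopA, if_neg (by rintro ⟨-, h2⟩; omega), pvCnt, dif_neg (by omega)]
    ring
  | succ n ih =>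
    intro j hj R
    have hj50 : j < 50 := by omega
    rw [pvLoopA]
    by_cases hR : R - Tcum j > 0
    · rw [if_pos ⟨hR, by omega⟩]
      by_cases hS : R - Tcum j ≥ (53236 + 505 * (j : Int)) + 505
      · rw [if_pos hS]
        have e1 : R - Tcum j - ((53236 + 505 * (j : Int)) + 505) = R - Tcum (j + 1) := by
          rw [Tcum]; ring
        have e2 : (53236 + 505 * (j : Int)) + 505 = 53236 + 505 * ((j + 1 : Nat) : Int) := by
          omega
        have e3 : 201 + (j : Int) + 1 = 201 + ((j + 1 : Nat) : Int) := by push_cast; ring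
        rw [e1, e2, e3, ih (j + 1) (by omega) R]
        have hT : Tcum (j + 1) ≤ R := by rw [Tcum]; omega
        conv_rhs => rw [pvCnt]
        rw [dif_pos hj50, if_pos hT]
        push_cast
        ring
      · rw [if_neg hS]
        have hz : pvCnt j R = 0 := pvCnt_zero (50 - j) j rfl R (by rw [Tcum]; omega)
        rw [hz]; ring
    · rw [if_neg (fun h => hR h.1)]
      have hz : pvCnt j R = 0 := pvCnt_zero (50 - j) j rfl R (by rw [Tcum]; omega)
      rw [hz]; ring

theorem loop_top (R : Int) : pvLoopA R 201 53236 = 201 + pvCnt 0 R := by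
  have hh := loop_inv 50 0 rfl R
  simpa [Tcum] using hh

theorem foldl_cnt : ∀ (n j : Nat), j + n = 50 → ∀ (acc R : Int),
    (List.range' (j + 1) n).foldl (fun acc k => if Tcum k ≤ R then acc + 1 else acc) acc
      = acc + pvCnt j R := by
  intro n
  induction n with
  | zero =>
    intro j hj acc R
    rw [pvCnt, dif_neg (by omega)]
    simp [List.range']
  | succ n ih =>
    intro j hj acc R
    conv_rhs => rw [pvCnt]
    rw [dif_pos (show j < 50 by omega), List.range'_succ, List.foldl_cons, ih (j + 1) (by omega)]
    split_ifs <;> ring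

theorem b_count (R : Int) :
    (PySem.List.pyRange 1 51 1).foldl
      (fun acc k => if 53236 * k + PySem.Int.floordiv (505 * k * (k + 1)) 2 ≤ R then acc + 1 else acc) 0
      = pvCnt 0 R := by
  have hl : PySem.List.pyRange 1 51 1 = (List.range' 1 50).map (fun k : Nat => (k : Int)) := by decide
  rw [hl, List.foldl_map]
  have hfun : (fun (acc : Int) (k : Nat) =>
      if 53236 * (k : Int) + PySem.Int.floordiv (505 * (k : Int) * ((k : Int) + 1)) 2 ≤ R then acc + 1 else acc)
      = fun acc k => if Tcum k ≤ R then acc + 1 else acc := by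
    funext acc k
    rw [← Tclosed]
  rw [hfun]
  have h := foldl_cnt 50 0 rfl 0 R
  simpa using h

-- ===== VERDICT (by name: the statement is the Claim_ definition above) =====
theorem exp_to_knight_level_py_spec : Claim_equal_exp_to_knight_level_py := by
  intro exp _
  unfold Spec_exp_to_knight_level_py exp_to_knight_level_py exp_to_knight_level_py_alt
  simp only [show (125 * 53235 : Int) = 6654375 from by norm_num,
    show (6654375 + 76 * 53236 : Int) = 10700311 from by norm_num]
  by_cases h0 : exp ≤ 0
  · simp only [if_pos h0]
  · simp only [if_neg h0]
    by_cases h1 : exp ≤ 6654375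
    · simp only [if_pos h1]
    · simp only [if_neg h1]
      by_cases h2 : exp ≤ 10700311
      · simp only [if_pos h2]
      · simp only [if_neg h2]
        rw [loop_top, b_count]
        by_cases hm : (50 : Int) ≤ pvCnt 0 (exp - 10700311)
        · rw [if_pos (by omega), if_pos (by omega)]
        · rw [if_neg (by omega), if_neg (by omega)]
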